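-- pv_equiv track=rewrite | github.com/iAMMIAA/CS114.O21.KHCL-MachineLearning | Labs/Lab2/ConDo.py | ferry_crossings
-- ===== SOURCE A (Python) =====
-- def ferry_crossings(l, m, cars):
--     left_bank, right_bank = [], []
--
--     for car in cars:
--         length, bank = car[0], car[1]
--         if bank == "left":
--             left_bank.append(length)
--         else:
--             right_bank.append(length)
--
--     crossings = 0
--     current_bank = left_bank
--     other_bank = right_bank
--
--     while left_bank or right_bank:
--         if not current_bank:
--             current_bank, other_bank = other_bank, current_bank
--             crossings += 1
--         else:
--             total_length = 0
--             while current_bank and total_length + current_bank[0] <= l * 100: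
--                 total_length += current_bank.pop(0)
--             current_bank, other_bank = other_bank, current_bank
--             crossings += 1
--
--     return crossings
-- ===== SOURCE B (Python) =====
-- def ferry_crossings(l, m, cars):
--     cap = l * 100
--
--     def batches(bank):
--         if not bank:
--             return 0
--         count, total = 1, 0
--         for x in bank:
--             if total + x <= cap:
--                 total += x
--             else:
--                 count, total = count + 1, x
--         return count
--
--     L = batches([c[0] for c in cars if c[1] == "left"])
--     R = batches([c[0] for c in cars if c[1] != "left"])
--     return max(2 * L - 1, 2 * R)
-- ===== Notes on version B (the rewrite author's own statement) =====
-- stated objective: simpler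
-- what changed: Replaces A's in-place alternating-ferry simulation (mutating pop-from-front inner loop and bank swapping) by two independent greedy batch counts per bank and the closed form max(2*L-1, 2*R).
import Mathlib
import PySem

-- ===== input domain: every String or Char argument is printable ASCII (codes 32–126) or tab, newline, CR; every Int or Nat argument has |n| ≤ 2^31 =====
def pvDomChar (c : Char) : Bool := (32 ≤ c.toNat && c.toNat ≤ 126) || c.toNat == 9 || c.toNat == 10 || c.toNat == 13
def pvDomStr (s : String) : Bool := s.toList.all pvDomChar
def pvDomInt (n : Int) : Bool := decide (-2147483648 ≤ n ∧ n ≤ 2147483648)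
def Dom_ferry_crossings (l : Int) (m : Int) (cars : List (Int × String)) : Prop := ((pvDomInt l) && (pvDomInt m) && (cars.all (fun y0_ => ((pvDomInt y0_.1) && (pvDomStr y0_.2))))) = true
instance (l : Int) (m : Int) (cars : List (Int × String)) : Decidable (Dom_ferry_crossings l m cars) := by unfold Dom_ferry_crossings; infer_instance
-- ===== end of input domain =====

-- B replaces A's in-place alternating-ferry simulation by two independent greedy
-- batch counts and the closed form max(2L-1, 2R); objective: simpler.

-- ===== PORT A =====
-- inner while loop: pop cars from the front of `cur` while they fit in the ferry
def pvLoadA (cap : Int) (total : Int) : List Int → Int × List Int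
  | [] => (total, [])
  | x :: xs => if total + x ≤ cap then pvLoadA cap (total + x) xs else (total, x :: xs)

-- outer while loop; `fuel` only makes the (possibly non-terminating) Python loop a
-- total function — under Pre_ the fuel supplied below is proven sufficient
def pvLoopA (cap : Int) : Nat → Int → List Int → List Int → Int
  | 0, crossings, _, _ => crossings
  | fuel + 1, crossings, cur, oth =>
    if cur = [] ∧ oth = [] then crossings
    else if cur = [] then pvLoopA cap fuel (crossings + 1) oth cur
    else pvLoopA cap fuel (crossings + 1) oth (pvLoadA cap 0 cur).2

def ferry_crossings (l : Int) (m : Int) (cars : List (Int × String)) : Int :=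
  let banks := cars.foldl (fun (acc : List Int × List Int) car =>
    if car.2 == "left" then (acc.1 ++ [car.1], acc.2) else (acc.1, acc.2 ++ [car.1])) ([], [])
  pvLoopA (l * 100) (2 * (banks.1.length + banks.2.length) + 2) 0 banks.1 banks.2

-- ===== PORT B =====
def pvBatches (cap : Int) (bank : List Int) : Int :=
  match bank with
  | [] => 0
  | _ :: _ =>
    (bank.foldl (fun (s : Int × Int) x =>
      if s.2 + x ≤ cap then (s.1, s.2 + x) else (s.1 + 1, x)) (1, 0)).1

def ferry_crossings_alt (l : Int) (m : Int) (cars : List (Int × String)) : Int :=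
  let cap := l * 100
  let L := pvBatches cap ((cars.filter (fun c => c.2 == "left")).map Prod.fst)
  let R := pvBatches cap ((cars.filter (fun c => !(c.2 == "left"))).map Prod.fst)
  max (2 * L - 1) (2 * R)

-- ===== PRECONDITION & SPEC =====
-- Pre_ excludes inputs containing a car longer than l*100: there A's outer while
-- loop never removes that car and Python A loops forever (returns nothing).
def Pre_ferry_crossings (l : Int) (m : Int) (cars : List (Int × String)) : Prop :=
  ∀ c ∈ cars, c.1 ≤ l * 100
instance (l : Int) (m : Int) (cars : List (Int × String)) : Decidable (Pre_ferry_crossings l m cars) := by unfold Pre_ferry_crossings; infer_instance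
def pvWitness_ferry_crossings : Int × Int × (List (Int × String)) := (3, 0, [(50, "left"), (200, "right"), (120, "left")])

def Spec_ferry_crossings (l : Int) (m : Int) (cars : List (Int × String)) (out : Int) : Prop := out = ferry_crossings_alt l m cars
instance (l : Int) (m : Int) (cars : List (Int × String)) (out : Int) : Decidable (Spec_ferry_crossings l m cars out) := by unfold Spec_ferry_crossings; infer_instance

-- ===== CLAIM (what is proved, stated in full; the proofs are below) =====
def Claim_equal_ferry_crossings : Prop := ∀ (l : Int) (m : Int) (cars : List (Int × String)), Dom_ferry_crossings l m cars → Pre_ferry_crossings l m cars → Spec_ferry_crossings l m cars (ferry_crossings l m cars)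

-- ===== LEMMAS AND PROOFS =====

-- number of batch starts still needed when the partially filled ferry carries `total`
def pvBcount (cap : Int) (total : Int) : List Int → Int
  | [] => 0
  | x :: xs => if total + x ≤ cap then pvBcount cap (total + x) xs else 1 + pvBcount cap x xs

-- B's fold computes pvBcount
theorem pvFold_eq_bcount (cap : Int) (xs : List Int) : ∀ (c total : Int),
    (xs.foldl (fun (s : Int × Int) x =>
      if s.2 + x ≤ cap then (s.1, s.2 + x) else (s.1 + 1, x)) (c, total)).1
    = c + pvBcount cap total xs := by
  induction xs with
  | nil => intro c total; simp [pvBcount]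
  | cons x xs ih =>
    intro c total
    simp only [List.foldl, pvBcount]
    by_cases h : total + x ≤ cap
    · simp [h, ih]
    · simp [h, ih]; ring

def pvBC (cap : Int) : List Int → Int
  | [] => 0
  | x :: xs => 1 + pvBcount cap 0 (x :: xs)

theorem pvBatches_eq_BC (cap : Int) (bank : List Int) : pvBatches cap bank = pvBC cap bank := by
  cases bank with
  | nil => rfl
  | cons x xs =>
    simp only [pvBatches, pvBC]
    exact pvFold_eq_bcount cap (x :: xs) 1 0

theorem pvBcount_nonneg (cap : Int) (xs : List Int) : ∀ total, 0 ≤ pvBcount cap total xs := by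
  induction xs with
  | nil => intro _; simp [pvBcount]
  | cons x xs ih =>
    intro total
    simp only [pvBcount]
    split
    · exact ih _
    · have := ih x; omega

theorem pvBC_nonneg (cap : Int) (xs : List Int) : 0 ≤ pvBC cap xs := by
  cases xs with
  | nil => simp [pvBC]
  | cons x xs => have := pvBcount_nonneg cap (x :: xs) 0; simp [pvBC]; omega

theorem pvBC_eq_zero (cap : Int) (xs : List Int) (h : pvBC cap xs = 0) : xs = [] := by
  cases xs with
  | nil => rfl
  | cons x xs => have := pvBcount_nonneg cap (x :: xs) 0; simp [pvBC] at h; omega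

theorem pvBcount_le_length (cap : Int) (xs : List Int) : ∀ total,
    pvBcount cap total xs ≤ xs.length := by
  induction xs with
  | nil => intro _; simp [pvBcount]
  | cons x xs ih =>
    intro total
    simp only [pvBcount, List.length_cons]
    split
    · have := ih (total + x); omega
    · have := ih x; omega

theorem pvBC_le_length (cap : Int) (xs : List Int) (hfit : ∀ x ∈ xs, x ≤ cap) :
    pvBC cap xs ≤ xs.length := by
  cases xs with
  | nil => simp [pvBC]
  | cons x xs =>
    have hx : (0 : Int) + x ≤ cap := by have := hfit x (by simp); omega
    have := pvBcount_le_length cap xs x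
    simp [pvBC, pvBcount]
    omega

theorem pvLoadA_mem (cap : Int) (xs : List Int) : ∀ total y,
    y ∈ (pvLoadA cap total xs).2 → y ∈ xs := by
  induction xs with
  | nil => intro total y h; simp [pvLoadA] at h
  | cons x xs ih =>
    intro total y h
    simp only [pvLoadA] at h
    split at h
    · exact List.mem_cons_of_mem _ (ih _ _ h)
    · exact h

-- loading one ferry removes exactly one greedy batch
theorem pvBcount_load (cap : Int) (xs : List Int) (hfit : ∀ x ∈ xs, x ≤ cap) : ∀ total,
    pvBcount cap total xs =
      (if (pvLoadA cap total xs).2 = [] then 0 else 1 + pvBcount cap 0 (pvLoadA cap total xs).2) := by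
  induction xs with
  | nil => intro total; simp [pvLoadA, pvBcount]
  | cons x xs ih =>
    intro total
    have hx : x ≤ cap := hfit x (by simp)
    have hfit' : ∀ y ∈ xs, y ≤ cap := fun y hy => hfit y (List.mem_cons_of_mem _ hy)
    simp only [pvBcount, pvLoadA]
    by_cases h : total + x ≤ cap
    · simp only [h, if_true]; exact ih hfit' (total + x)
    · have h0 : (0 : Int) + x ≤ cap := by omega
      simp [h, pvBcount, hx]

theorem pvBC_load (cap : Int) (xs : List Int) (hxs : xs ≠ []) (hfit : ∀ x ∈ xs, x ≤ cap) :
    pvBC cap xs = 1 + pvBC cap (pvLoadA cap 0 xs).2 := by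
  cases xs with
  | nil => exact absurd rfl hxs
  | cons x xs =>
    have h := pvBcount_load cap (x :: xs) hfit 0
    simp only [pvBC]
    rw [h]
    cases hr : (pvLoadA cap 0 (x :: xs)).2 with
    | nil => simp
    | cons y ys => simp

-- the simulation's crossing count is the closed form over the two banks' batch counts
theorem pvLoopA_closed (cap : Int) : ∀ (fuel : Nat) (cur oth : List Int) (c : Int),
    (∀ x ∈ cur, x ≤ cap) → (∀ x ∈ oth, x ≤ cap) →
    max (2 * pvBC cap cur - 1) (2 * pvBC cap oth) ≤ (fuel : Int) →
    pvLoopA cap fuel c cur oth = c + max (2 * pvBC cap cur - 1) (2 * pvBC cap oth) := by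
  intro fuel
  induction fuel with
  | zero =>
    intro cur oth c hc ho hf
    have h1 := pvBC_nonneg cap cur
    have h2 := pvBC_nonneg cap oth
    simp only [Nat.cast_zero] at hf
    have hoz : pvBC cap oth = 0 := by omega
    have hcz : pvBC cap cur = 0 := by omega
    have : cur = [] := pvBC_eq_zero cap cur hcz
    have : oth = [] := pvBC_eq_zero cap oth hoz
    simp_all [pvLoopA, pvBC]
  | succ fuel ih =>
    intro cur oth c hc ho hf
    have hcn := pvBC_nonneg cap cur
    have hon := pvBC_nonneg cap oth
    simp only [pvLoopA]
    by_cases hboth : cur = [] ∧ oth = []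
    · obtain ⟨h1, h2⟩ := hboth
      subst h1; subst h2
      simp [pvBC]
    · simp only [if_neg hboth]
      by_cases hcur : cur = []
      · have hoth : oth ≠ [] := fun h => hboth ⟨hcur, h⟩
        have hoz : 1 ≤ pvBC cap oth := by
          rcases Int.lt_or_lt_of_ne (fun h => hoth (pvBC_eq_zero cap oth h.symm)) with h | h
          · omega
          · omega
        subst hcur
        rw [if_pos rfl]
        have hBnil : pvBC cap ([] : List Int) = 0 := rfl
        rw [hBnil] at hf ⊢
        push_cast at hf
        rw [ih oth [] (c + 1) ho (by simp) (by rw [hBnil]; omega)]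
        rw [hBnil]
        omega
      · simp only [if_neg hcur]
        set rest := (pvLoadA cap 0 cur).2 with hrest
        have hrfit : ∀ x ∈ rest, x ≤ cap := fun x hx => hc x (pvLoadA_mem cap cur 0 x hx)
        have hbc : pvBC cap cur = 1 + pvBC cap rest := pvBC_load cap cur hcur hc
        have hrn := pvBC_nonneg cap rest
        rw [ih oth rest (c + 1) ho hrfit (by push_cast at hf ⊢; omega)]
        push_cast at hf ⊢
        omega

-- A's foldl partition equals B's two filter-map passes
theorem pvPartition_eq (cars : List (Int × String)) : ∀ (acc : List Int × List Int),
    cars.foldl (fun (acc : List Int × List Int) car =>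
      if car.2 == "left" then (acc.1 ++ [car.1], acc.2) else (acc.1, acc.2 ++ [car.1])) acc
    = (acc.1 ++ (cars.filter (fun c => c.2 == "left")).map Prod.fst,
       acc.2 ++ (cars.filter (fun c => !(c.2 == "left"))).map Prod.fst) := by
  induction cars with
  | nil => intro acc; simp
  | cons car cars ih =>
    intro acc
    rw [List.foldl_cons]
    by_cases h : (car.2 == "left") = true
    · rw [if_pos h, ih]
      simp [h]
    · rw [if_neg h, ih]
      simp [h]

-- ===== VERDICT (by name: the statement is the Claim_ definition above) =====
theorem ferry_crossings_spec : Claim_equal_ferry_crossings := by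
  intro l m cars _ hpre
  unfold Spec_ferry_crossings ferry_crossings ferry_crossings_alt
  rw [pvPartition_eq cars ([], [])]
  simp only [List.nil_append]
  set cap := l * 100 with hcap
  set L := (cars.filter (fun c => c.2 == "left")).map Prod.fst with hL
  set R := (cars.filter (fun c => !(c.2 == "left"))).map Prod.fst with hR
  have hfitL : ∀ x ∈ L, x ≤ cap := by
    intro x hx
    rw [hL] at hx
    obtain ⟨c, hc, rfl⟩ := List.mem_map.mp hx
    exact hpre c (List.mem_of_mem_filter hc)
  have hfitR : ∀ x ∈ R, x ≤ cap := by
    intro x hx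
    rw [hR] at hx
    obtain ⟨c, hc, rfl⟩ := List.mem_map.mp hx
    exact hpre c (List.mem_of_mem_filter hc)
  have hbL := pvBC_le_length cap L hfitL
  have hbR := pvBC_le_length cap R hfitR
  have hLn := pvBC_nonneg cap L
  have hRn := pvBC_nonneg cap R
  rw [pvLoopA_closed cap _ L R 0 hfitL hfitR (by push_cast; omega)]
  rw [pvBatches_eq_BC, pvBatches_eq_BC]
  omega
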